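-- pv_equiv track=rewrite | github.com/jbsavage57/medsort | app.py | sort_docs
-- ===== SOURCE A (Python) =====
-- from collections import OrderedDict
--
-- def sort_docs(doc_dict):
--     doc_ordered = OrderedDict()
--     for key in doc_dict.keys():
--
--         doc_list = list(doc_dict[key])
--         if doc_list[0] == 'test':
--             doc_ordered[key]=doc_dict[key]
--     for key in doc_dict.keys():
--         doc_list = list(doc_dict[key])
--         if doc_list[0] == 'procedure':
--             doc_ordered[key]=doc_dict[key]
--     for key in doc_dict.keys():
--         doc_list = list(doc_dict[key])
--         if doc_list[0] == 'note':
--             doc_ordered[key]=doc_dict[key]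
--     return doc_ordered
-- ===== SOURCE B (Python) =====
-- from collections import OrderedDict
--
-- def sort_docs(doc_dict):
--     tests, procs, notes = [], [], []
--     for key, value in doc_dict.items():
--         first = list(value)[0]
--         if first == 'test':
--             tests.append((key, value))
--         elif first == 'procedure':
--             procs.append((key, value))
--         elif first == 'note':
--             notes.append((key, value))
--     return OrderedDict(tests + procs + notes)
-- ===== Notes on version B (the rewrite author's own statement) =====
-- stated objective: simpler
-- what changed: A scans the whole dict three times (once per category, inserting matches into an OrderedDict); B makes a single pass routing each (key, value) pair into one of three lists by its first element and returns OrderedDict(tests + procs + notes).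
-- outside the precondition, e.g. on sort_docs({'a': []}): A raises IndexError, B raises IndexError
import Mathlib
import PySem

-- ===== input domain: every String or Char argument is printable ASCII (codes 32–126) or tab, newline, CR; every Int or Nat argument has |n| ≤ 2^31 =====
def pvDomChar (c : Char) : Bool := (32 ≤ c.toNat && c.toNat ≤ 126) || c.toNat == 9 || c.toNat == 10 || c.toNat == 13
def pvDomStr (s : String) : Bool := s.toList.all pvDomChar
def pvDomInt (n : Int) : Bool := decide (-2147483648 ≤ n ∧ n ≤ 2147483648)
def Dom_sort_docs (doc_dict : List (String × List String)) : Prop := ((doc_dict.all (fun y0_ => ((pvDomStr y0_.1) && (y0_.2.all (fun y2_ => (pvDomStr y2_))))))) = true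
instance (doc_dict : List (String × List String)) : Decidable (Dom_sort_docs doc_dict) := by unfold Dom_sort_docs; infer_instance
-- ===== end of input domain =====

-- B replaces A's three full scans of the dict by a single pass that routes each
-- (key, value) pair into one of three lists and concatenates them (objective: simpler).

-- ===== PORT A =====
-- A's three loops are identical up to the category string; this helper is one such loop:
-- "for key in doc_dict.keys(): doc_list = list(doc_dict[key]); if doc_list[0] == cat: doc_ordered[key] = doc_dict[key]"
-- (doc_list[0] on an empty value raises IndexError in Python: pyGet? = none there, excluded by Pre_).
def sortDocsLoop (d : PySem.Dict String (List String)) (cat : String)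
    (acc0 : PySem.Dict String (List String)) : PySem.Dict String (List String) :=
  d.keys.foldl (fun acc key =>
    match d.get? key with
    | some v =>
      match PySem.List.pyGet? v 0 with
      | some x => if x = cat then acc.insert key v else acc
      | none => acc
    | none => acc) acc0

def sort_docs (doc_dict : List (String × List String)) : List (String × List String) :=
  let d : PySem.Dict String (List String) := PySem.Dict.mk doc_dict
  (sortDocsLoop d "note" (sortDocsLoop d "procedure" (sortDocsLoop d "test" PySem.Dict.empty))).items

-- ===== PORT B =====
def sort_docs_alt (doc_dict : List (String × List String)) : List (String × List String) :=
  let t := doc_dict.foldl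
    (fun (acc : List (String × List String) × List (String × List String) × List (String × List String)) p =>
      match PySem.List.pyGet? p.2 0 with
      | some first =>
        if first = "test" then (acc.1 ++ [p], acc.2.1, acc.2.2)
        else if first = "procedure" then (acc.1, acc.2.1 ++ [p], acc.2.2)
        else if first = "note" then (acc.1, acc.2.1, acc.2.2 ++ [p])
        else acc
      | none => acc)
    ([], [], [])
  (PySem.Dict.ofList (t.1 ++ t.2.1 ++ t.2.2)).items

-- ===== PRECONDITION & SPEC =====
-- Pre_ excludes duplicate keys (a Python dict cannot hold them, so such association
-- lists represent no real input) and empty values (doc_list[0] raises IndexError in A and B alike).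
def Pre_sort_docs (doc_dict : List (String × List String)) : Prop :=
  (doc_dict.map Prod.fst).Nodup ∧ ∀ p ∈ doc_dict, p.2 ≠ []
instance (doc_dict : List (String × List String)) : Decidable (Pre_sort_docs doc_dict) := by
  unfold Pre_sort_docs; infer_instance

def pvWitness_sort_docs : (List (String × List String)) :=
  [("a", ["note", "n1"]), ("b", ["test"]), ("c", ["procedure", "p"]), ("d", ["memo"])]

def Spec_sort_docs (doc_dict : List (String × List String)) (out : List (String × List String)) : Prop := out = sort_docs_alt doc_dict
instance (doc_dict : List (String × List String)) (out : List (String × List String)) : Decidable (Spec_sort_docs doc_dict out) := by unfold Spec_sort_docs; infer_instance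

-- ===== CLAIM (what is proved, stated in full; the proofs are below) =====
def Claim_equal_sort_docs : Prop := ∀ (doc_dict : List (String × List String)), Dom_sort_docs doc_dict → Pre_sort_docs doc_dict → Spec_sort_docs doc_dict (sort_docs doc_dict)

-- ===== LEMMAS AND PROOFS =====

-- category predicate shared by the two characterisations
def catP (cat : String) (p : String × List String) : Bool := p.2.head? == some cat

lemma key_inj {l : List (String × List String)} (hnd : (l.map Prod.fst).Nodup)
    {p q : String × List String} (hp : p ∈ l) (hq : q ∈ l) (h : p.1 = q.1) : p = q := by
  have := List.inj_on_of_nodup_map hnd hp hq h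
  exact this

lemma pyGet?_zero_head? (v : List String) : PySem.List.pyGet? v 0 = v.head? := by
  cases v <;> simp [PySem.List.pyGet?, PySem.List.pyIdx?]

lemma loopA_items (d : PySem.Dict String (List String)) (cat : String) :
    ∀ (l : List (String × List String)) (acc : PySem.Dict String (List String)),
    (∀ p ∈ l, d.get? p.1 = some p.2) → (l.map Prod.fst).Nodup →
    (∀ p ∈ l, catP cat p = true → acc.contains p.1 = false) →
    ((l.map Prod.fst).foldl (fun acc key =>
      match d.get? key with
      | some v =>
        match PySem.List.pyGet? v 0 with
        | some x => if x = cat then acc.insert key v else acc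
        | none => acc
      | none => acc) acc).items = acc.items ++ l.filter (catP cat) := by
  intro l
  induction l with
  | nil => intro acc _ _ _; simp
  | cons p rest ih =>
    intro acc hget hnd hfree
    have hgp : d.get? p.1 = some p.2 := hget p (by simp)
    have hnd' : (rest.map Prod.fst).Nodup := (List.nodup_cons.mp hnd).2
    have hne : p.1 ∉ rest.map Prod.fst := (List.nodup_cons.mp hnd).1
    rcases hv : PySem.List.pyGet? p.2 0 with _ | x
    <;> have hv2 : p.2.head? = PySem.List.pyGet? p.2 0 := (pyGet?_zero_head? p.2).symm
    <;> rw [hv] at hv2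
    <;> simp only [List.map_cons, List.foldl_cons, hgp, hv]
    · -- empty value: skipped, and catP is false
      have hc : catP cat p = false := by simp [catP, hv2]
      rw [ih acc (fun q hq => hget q (by simp [hq])) hnd'
        (fun q hq hcq => hfree q (by simp [hq]) hcq)]
      simp [hc]
    · by_cases hx : x = cat
      · -- insert case
        have hcp : catP cat p = true := by simp [catP, hv2, hx]
        have hfr : acc.contains p.1 = false := hfree p (by simp) hcp
        have hitems := PySem.Dict.items_insert_of_not_contains acc p.2 hfr
        rw [if_pos hx,
          ih (acc.insert p.1 p.2) (fun q hq => hget q (by simp [hq])) hnd'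
            (fun q hq hcq => by
              rw [PySem.Dict.contains_insert]
              have hqne : q.1 ≠ p.1 := by
                intro he
                exact hne (he ▸ List.mem_map_of_mem hq)
              simp [hqne, hfree q (by simp [hq]) hcq]),
          hitems]
        simp [hcp, Prod.mk.eta]
      · have hc : catP cat p = false := by simp [catP, hv2, hx]
        rw [if_neg hx,
          ih acc (fun q hq => hget q (by simp [hq])) hnd'
            (fun q hq hcq => hfree q (by simp [hq]) hcq)]
        simp [hc]

lemma loopB_eq (l : List (String × List String)) :
    ∀ (t pr n : List (String × List String)),
    l.foldl (fun (acc : List (String × List String) × List (String × List String) × List (String × List String)) p =>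
      match PySem.List.pyGet? p.2 0 with
      | some first =>
        if first = "test" then (acc.1 ++ [p], acc.2.1, acc.2.2)
        else if first = "procedure" then (acc.1, acc.2.1 ++ [p], acc.2.2)
        else if first = "note" then (acc.1, acc.2.1, acc.2.2 ++ [p])
        else acc
      | none => acc) (t, pr, n)
    = (t ++ l.filter (catP "test"), pr ++ l.filter (catP "procedure"), n ++ l.filter (catP "note")) := by
  induction l with
  | nil => intro t pr n; simp
  | cons p rest ih =>
    intro t pr n
    rcases hv : PySem.List.pyGet? p.2 0 with _ | x
    <;> have hv2 : p.2.head? = PySem.List.pyGet? p.2 0 := (pyGet?_zero_head? p.2).symm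
    <;> rw [hv] at hv2
    <;> simp only [List.foldl_cons, hv]
    · have : ∀ c, catP c p = false := fun c => by simp [catP, hv2]
      simp [ih, this]
    · by_cases h1 : x = "test"
      · simp [h1, ih, catP, hv2]
      · by_cases h2 : x = "procedure"
        · simp [h2, ih, catP, hv2]
        · by_cases h3 : x = "note"
          · simp [h3, ih, catP, hv2]
          · simp [h1, h2, h3, ih, catP, hv2]

lemma mem_filter_keys_ne {l : List (String × List String)} (hnd : (l.map Prod.fst).Nodup)
    {c c' : String} (hcc : c ≠ c') :
    ∀ k, k ∈ (l.filter (catP c)).map Prod.fst → k ∈ (l.filter (catP c')).map Prod.fst → False := by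
  intro k hk hk'
  obtain ⟨p, hp, hpk⟩ := List.mem_map.mp hk
  obtain ⟨q, hq, hqk⟩ := List.mem_map.mp hk'
  have hpl := (List.mem_filter.mp hp).1
  have hql := (List.mem_filter.mp hq).1
  have hpq : p = q := key_inj hnd hpl hql (hpk.trans hqk.symm)
  have hc := (List.mem_filter.mp hp).2
  have hc' := (List.mem_filter.mp hq).2
  rw [hpq] at hc
  simp [catP] at hc hc'
  exact hcc (Option.some.inj (hc.symm.trans hc'))

lemma nodup_filter_keys {l : List (String × List String)} (hnd : (l.map Prod.fst).Nodup)
    (c : String) : ((l.filter (catP c)).map Prod.fst).Nodup :=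
  hnd.sublist (List.Sublist.map Prod.fst (List.filter_sublist))

lemma contains_of_items {d : PySem.Dict String (List String)}
    {l : List (String × List String)} (h : d.items = l) (k : String) :
    d.contains k = false ↔ k ∉ l.map Prod.fst := by
  constructor
  · intro hc hk
    have := (PySem.Dict.contains_iff_mem_keys d k).mpr (by simpa [PySem.Dict.keys, h] using hk)
    rw [this] at hc; cases hc
  · intro hk
    by_cases hc : d.contains k = true
    · exact absurd (by simpa [PySem.Dict.keys, h] using (PySem.Dict.contains_iff_mem_keys d k).mp hc) hk
    · simpa using hc

-- ===== VERDICT (by name: the statement is the Claim_ definition above) =====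
theorem sort_docs_spec : Claim_equal_sort_docs := by
  intro doc_dict _ hpre
  obtain ⟨hnd, _⟩ := hpre
  unfold Spec_sort_docs sort_docs sort_docs_alt sortDocsLoop
  simp only []
  set d : PySem.Dict String (List String) := PySem.Dict.mk doc_dict with hd
  have hkeys : d.keys = doc_dict.map Prod.fst := by simp [hd, PySem.Dict.keys]
  have hndk : d.keys.Nodup := by rw [hkeys]; exact hnd
  have hget : ∀ p ∈ doc_dict, d.get? p.1 = some p.2 := fun p hp =>
    PySem.Dict.get?_of_mem_items d (by simpa [hd] using hp) hndk
  rw [hkeys]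
  -- the three loops of A, characterised one after the other
  have h1 := loopA_items d "test" doc_dict PySem.Dict.empty hget hnd
    (fun p _ _ => PySem.Dict.contains_empty p.1)
  have hemp : (PySem.Dict.empty : PySem.Dict String (List String)).items = [] := rfl
  simp only [hemp, List.nil_append] at h1
  have h2 := loopA_items d "procedure" doc_dict _ hget hnd
    (fun p hp hc => (contains_of_items h1 p.1).mpr (fun hk =>
      mem_filter_keys_ne hnd (by decide : "test" ≠ "procedure") p.1 hk
        (List.mem_map_of_mem (List.mem_filter.mpr ⟨hp, hc⟩))))
  rw [h1] at h2
  have h3 := loopA_items d "note" doc_dict _ hget hnd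
    (fun p hp hc => (contains_of_items h2 p.1).mpr (fun hk => by
      rcases List.mem_map.mp hk with ⟨q, hq, hqk⟩
      rcases List.mem_append.mp hq with hq' | hq'
      · exact mem_filter_keys_ne hnd (by decide : "test" ≠ "note") p.1
          (hqk ▸ List.mem_map_of_mem hq')
          (List.mem_map_of_mem (List.mem_filter.mpr ⟨hp, hc⟩))
      · exact mem_filter_keys_ne hnd (by decide : "procedure" ≠ "note") p.1
          (hqk ▸ List.mem_map_of_mem hq')
          (List.mem_map_of_mem (List.mem_filter.mpr ⟨hp, hc⟩))))
  rw [h2] at h3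
  -- B's single pass
  rw [loopB_eq doc_dict [] [] []]
  simp only [List.nil_append]
  -- OrderedDict over fresh distinct keys is the list itself
  have hconcat : ((doc_dict.filter (catP "test") ++ doc_dict.filter (catP "procedure")
      ++ doc_dict.filter (catP "note")).map Prod.fst).Nodup := by
    simp only [List.map_append]
    refine (List.Nodup.append (List.Nodup.append (nodup_filter_keys hnd _)
      (nodup_filter_keys hnd _) ?_) (nodup_filter_keys hnd _) ?_)
    · exact fun k hk hk' => mem_filter_keys_ne hnd (by decide) k hk hk'
    · intro k hk hk'
      rcases List.mem_append.mp hk with h' | h'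
      · exact mem_filter_keys_ne hnd (by decide : "test" ≠ "note") k h' hk'
      · exact mem_filter_keys_ne hnd (by decide : "procedure" ≠ "note") k h' hk'
  have hof := PySem.Dict.items_foldl_insert_fresh
    (doc_dict.filter (catP "test") ++ doc_dict.filter (catP "procedure")
      ++ doc_dict.filter (catP "note"))
    Prod.fst Prod.snd PySem.Dict.empty
    (fun a _ => PySem.Dict.contains_empty a.1) hconcat
  simp only [hemp, List.nil_append, Prod.mk.eta] at hof
  rw [h3]
  unfold PySem.Dict.ofList PySem.Dict.update
  simpa [List.append_assoc] using hof.symm
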